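-- pv_equiv track=rewrite | github.com/hal0x/mcp_d | servers/memory-mcp/src/memory_mcp/analysis/summarization/session/utils.py | select_messages_with_keywords
-- ===== SOURCE A (Python) =====
-- from typing import Any, Dict, List, Optional, Tuple
--
-- def select_messages_with_keywords(
--     messages: List[Dict[str, Any]], keywords: List[str], limit: int
-- ) -> List[Dict[str, Any]]:
--     matched = []
--     keywords_lower = [kw.lower() for kw in keywords]
--
--     for msg in messages:
--         text = (msg.get("text") or "").lower()
--         if not text:
--             continue
--         if any(kw in text for kw in keywords_lower):
--             matched.append(msg)
--
--     matched.sort(key=lambda m: (m.get("date_utc") or m.get("date") or ""))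
--     return matched[:limit]
-- ===== SOURCE B (Python) =====
-- def select_messages_with_keywords(messages, keywords, limit):
--     kws = [kw.lower() for kw in keywords]
--
--     def date_key(m):
--         return m.get("date_utc") or m.get("date") or ""
--
--     def is_match(m):
--         text = (m.get("text") or "").lower()
--         return bool(text) and any(kw in text for kw in kws)
--
--     # bucket sort by date key: group matched messages into hash buckets keyed
--     # by their date key (original order preserved inside a bucket = stability),
--     # then sort only the distinct keys and concatenate the buckets.
--     buckets = {}
--     for msg in messages:
--         if is_match(msg):
--             k = date_key(msg)
--             buckets[k] = buckets.get(k, []) + [msg]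
--     out = []
--     for k in sorted(buckets):
--         out += buckets[k]
--     return out[:limit]
-- ===== Notes on version B (the rewrite author's own statement) =====
-- stated objective: alternative
-- what changed: B replaces A's filter-then-comparison-sort pipeline by a bucket sort: one pass groups matching messages into a hash table keyed by their date key (order inside a bucket = stability), then only the distinct keys are sorted and the buckets concatenated before slicing.
import Mathlib
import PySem

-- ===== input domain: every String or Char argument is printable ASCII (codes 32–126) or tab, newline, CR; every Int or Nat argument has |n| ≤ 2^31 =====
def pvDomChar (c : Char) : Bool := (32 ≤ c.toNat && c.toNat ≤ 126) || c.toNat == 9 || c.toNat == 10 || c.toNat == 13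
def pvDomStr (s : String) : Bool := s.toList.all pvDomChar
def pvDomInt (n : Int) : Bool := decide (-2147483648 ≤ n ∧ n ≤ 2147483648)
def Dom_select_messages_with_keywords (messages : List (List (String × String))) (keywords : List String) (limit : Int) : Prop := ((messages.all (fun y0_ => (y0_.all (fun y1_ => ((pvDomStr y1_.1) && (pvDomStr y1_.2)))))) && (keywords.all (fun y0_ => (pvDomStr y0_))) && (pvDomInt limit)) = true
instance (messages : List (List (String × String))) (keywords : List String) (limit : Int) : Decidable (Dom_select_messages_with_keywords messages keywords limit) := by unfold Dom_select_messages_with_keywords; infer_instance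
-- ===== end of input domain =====

-- B replaces A's filter-then-comparison-sort by a bucket sort: one pass groups matching
-- messages into a hash table keyed by their date key, then only the distinct keys are
-- sorted and the buckets concatenated (objective: alternative algorithm).

-- shared helpers: Python's `x or y` on string values, dict lookup, and the date sort key
def pyOrStr (a : Option String) (b : String) : String :=
  match a with
  | none => b
  | some s => if s = "" then b else s

def pvGet (msg : List (String × String)) (k : String) : Option String :=
  (PySem.Dict.mk msg).get? k

def pvDateKey (m : List (String × String)) : String :=
  pyOrStr (pvGet m "date_utc") (pyOrStr (pvGet m "date") "")

-- ===== PORT A =====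
def select_messages_with_keywords (messages : List (List (String × String))) (keywords : List String) (limit : Int) : List (List (String × String)) :=
  let keywords_lower := keywords.map (fun kw => PySem.Str.lower kw)
  let matched := messages.foldl (fun matched msg =>
      let text := PySem.Str.lower (pyOrStr (pvGet msg "text") "")
      if text = "" then matched
      else if keywords_lower.any (fun kw => PySem.Str.isIn kw text) then matched ++ [msg]
      else matched) []
  PySem.List.slice (PySem.List.sorted matched pvDateKey) none (some limit)

-- ===== PORT B =====
-- Source B's is_match helper
def pvIsMatch (kws : List String) (m : List (String × String)) : Bool :=
  let text := PySem.Str.lower (pyOrStr (pvGet m "text") "")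
  decide (text ≠ "") && kws.any (fun kw => PySem.Str.isIn kw text)

def select_messages_with_keywords_alt (messages : List (List (String × String))) (keywords : List String) (limit : Int) : List (List (String × String)) :=
  let kws := keywords.map (fun kw => PySem.Str.lower kw)
  -- buckets[k] = buckets.get(k, []) + [msg]
  let buckets := messages.foldl (fun (d : PySem.Dict String (List (List (String × String)))) msg =>
      if pvIsMatch kws msg then
        let k := pvDateKey msg
        d.modify k [] (fun v => v ++ [msg])
      else d) PySem.Dict.empty
  -- for k in sorted(buckets): out += buckets[k]
  let out := (PySem.List.sorted buckets.keys (fun k => k)).foldl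
      (fun out k => out ++ buckets.getD k []) []
  PySem.List.slice out none (some limit)

-- ===== PRECONDITION & SPEC =====
def Spec_select_messages_with_keywords (messages : List (List (String × String))) (keywords : List String) (limit : Int) (out : List (List (String × String))) : Prop := out = select_messages_with_keywords_alt messages keywords limit
instance (messages : List (List (String × String))) (keywords : List String) (limit : Int) (out : List (List (String × String))) : Decidable (Spec_select_messages_with_keywords messages keywords limit out) := by unfold Spec_select_messages_with_keywords; infer_instance

-- ===== CLAIM (what is proved, stated in full; the proofs are below) =====
def Claim_equal_select_messages_with_keywords : Prop := ∀ (messages : List (List (String × String))) (keywords : List String) (limit : Int), Dom_select_messages_with_keywords messages keywords limit → Spec_select_messages_with_keywords messages keywords limit (select_messages_with_keywords messages keywords limit)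

-- ===== LEMMAS AND PROOFS =====

-- A's accumulator loop is a filter by pvIsMatch
theorem pv_matched_eq_filter (messages : List (List (String × String))) (kws : List String) :
    messages.foldl (fun matched msg =>
      let text := PySem.Str.lower (pyOrStr (pvGet msg "text") "")
      if text = "" then matched
      else if kws.any (fun kw => PySem.Str.isIn kw text) then matched ++ [msg]
      else matched) []
    = messages.filter (pvIsMatch kws) := by
  have h : ∀ (acc : List (List (String × String))) (msg : List (String × String)),
      (let text := PySem.Str.lower (pyOrStr (pvGet msg "text") "")
       if text = "" then acc
       else if kws.any (fun kw => PySem.Str.isIn kw text) then acc ++ [msg]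
       else acc)
      = if pvIsMatch kws msg then acc ++ [msg] else acc := by
    intro acc msg
    simp only [pvIsMatch]
    by_cases ht : PySem.Str.lower (pyOrStr (pvGet msg "text") "") = ""
    · simp [ht]
    · simp [ht]
  calc messages.foldl (fun matched msg =>
        let text := PySem.Str.lower (pyOrStr (pvGet msg "text") "")
        if text = "" then matched
        else if kws.any (fun kw => PySem.Str.isIn kw text) then matched ++ [msg]
        else matched) []
      = messages.foldl (fun acc msg => if pvIsMatch kws msg then acc ++ [msg] else acc) [] := by
        congr 1; funext acc msg; exact h acc msg
    _ = messages.filter (pvIsMatch kws) := by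
        simpa using PySem.List.foldl_append_if (pvIsMatch kws) id messages []

-- B's guarded grouping loop over messages is the plain grouping loop over the
-- (date-key, message) pairs of the matching messages
theorem pv_buckets_eq_pairs_fold (kws : List String) (messages : List (List (String × String))) :
    ∀ (d : PySem.Dict String (List (List (String × String)))),
    messages.foldl (fun d msg =>
        if pvIsMatch kws msg then d.modify (pvDateKey msg) [] (fun v => v ++ [msg]) else d) d
    = ((messages.filter (pvIsMatch kws)).map (fun m => (pvDateKey m, m))).foldl
        (fun d p => d.modify p.1 [] (fun v => v ++ [p.2])) d := by
  induction messages with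
  | nil => intro d; rfl
  | cons m ms ih =>
    intro d
    by_cases hm : pvIsMatch kws m = true
    · simp [hm, ih]
    · simp [hm, ih]

-- x sorting before every element of l puts it in front
theorem pv_insertBy_front {α : Type} (before : α → α → Bool) (x : α) (l : List α)
    (h : ∀ z ∈ l, before x z = true) : PySem.List.insertBy before x l = x :: l := by
  cases l with
  | nil => rfl
  | cons y ys => simp [PySem.List.insertBy, h y (by simp)]

-- insertBy skips a prefix it does not sort before
theorem pv_insertBy_append {α : Type} (before : α → α → Bool) (x : α) (l₁ l₂ : List α)
    (h : ∀ z ∈ l₁, before x z = false) :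
    PySem.List.insertBy before x (l₁ ++ l₂) = l₁ ++ PySem.List.insertBy before x l₂ := by
  induction l₁ with
  | nil => rfl
  | cons y ys ih =>
    simp only [List.cons_append, PySem.List.insertBy, h y (by simp)]
    simp only [Bool.false_eq_true, if_neg, not_false_iff]
    rw [ih (fun z hz => h z (by simp [hz]))]

-- the stable sort is the concatenation, over any strictly increasing list of keys
-- covering all keys, of the per-key groups in original order (bucket-sort principle)
theorem pv_sorted_eq_flatMap {α κ : Type} [LinearOrder κ] [DecidableEq κ] (key : α → κ)
    (ys : List α) (ks : List κ) (hks : ks.Pairwise (· < ·))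
    (hcov : ∀ m ∈ ys, key m ∈ ks) :
    PySem.List.sorted ys key = ks.flatMap (fun k => ys.filter (fun m => key m = k)) := by
  induction ys using List.reverseRecOn with
  | nil =>
    rw [PySem.List.sorted_eq_foldl_insertBy]
    simp
  | append_singleton ys y ih =>
    have hy : key y ∈ ks := hcov y (by simp)
    obtain ⟨ks₁, ks₂, rfl⟩ := List.append_of_mem hy
    have hpair := hks
    rw [List.pairwise_append] at hpair
    obtain ⟨h₁, h₂, h₁₂⟩ := hpair
    have hlt₁ : ∀ k ∈ ks₁, k < key y := fun k hk => h₁₂ k hk (key y) (by simp)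
    have hlt₂ : ∀ k ∈ ks₂, key y < k := fun k hk => (List.pairwise_cons.mp h₂).1 k hk
    have ihy := ih (fun m hm => hcov m (by simp [hm]))
    -- left side: sorted of the extended list is an insertion into the grouped form
    have hsort : PySem.List.sorted (ys ++ [y]) key
        = PySem.List.insertBy (fun a b => decide (key a < key b)) y (PySem.List.sorted ys key) := by
      rw [PySem.List.sorted_eq_foldl_insertBy, PySem.List.sorted_eq_foldl_insertBy,
        List.foldl_append]
      rfl
    rw [hsort, ihy]
    -- break the grouped form at key y's bucket
    have hsplit : (ks₁ ++ key y :: ks₂).flatMap (fun k => ys.filter (fun m => key m = k))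
        = ks₁.flatMap (fun k => ys.filter (fun m => key m = k))
          ++ (ys.filter (fun m => key m = key y)
          ++ ks₂.flatMap (fun k => ys.filter (fun m => key m = k))) := by
      simp [List.flatMap_append]
    rw [hsplit]
    -- insertion lands exactly at the end of key y's bucket
    rw [pv_insertBy_append _ y _ _ (by
        intro z hz
        simp only [List.mem_flatMap, List.mem_filter, decide_eq_true_eq] at hz
        obtain ⟨k, hk, _, hkey⟩ := hz
        simp only [decide_eq_false_iff_not, not_lt, hkey]
        exact le_of_lt (hlt₁ k hk)),
      pv_insertBy_append _ y _ _ (by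
        intro z hz
        simp only [List.mem_filter, decide_eq_true_eq] at hz
        simp [hz.2]),
      pv_insertBy_front _ y _ (by
        intro z hz
        simp only [List.mem_flatMap, List.mem_filter, decide_eq_true_eq] at hz
        obtain ⟨k, hk, _, hkey⟩ := hz
        simp only [decide_eq_true_eq, hkey]
        exact hlt₂ k hk)]
    -- right side: only key y's bucket gains y
    have hfil : ∀ k : κ, (ys ++ [y]).filter (fun m => key m = k)
        = ys.filter (fun m => key m = k) ++ if key y = k then [y] else [] := by
      intro k
      rw [List.filter_append]
      congr 1
      by_cases h : key y = k <;> simp [h]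
    have hne₁ : ∀ k ∈ ks₁, ¬ key y = k := fun k hk h =>
      absurd (hlt₁ k hk) (by rw [h]; exact lt_irrefl k)
    have hne₂ : ∀ k ∈ ks₂, ¬ key y = k := fun k hk h =>
      absurd (hlt₂ k hk) (by rw [h]; exact lt_irrefl k)
    simp only [List.flatMap_append, List.flatMap_cons, hfil]
    have e₁ : ks₁.flatMap (fun k => ys.filter (fun m => key m = k) ++ if key y = k then [y] else [])
        = ks₁.flatMap (fun k => ys.filter (fun m => key m = k)) :=
      List.flatMap_congr (fun k hk => by rw [if_neg (hne₁ k hk), List.append_nil])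
    have e₂ : ks₂.flatMap (fun k => ys.filter (fun m => key m = k) ++ if key y = k then [y] else [])
        = ks₂.flatMap (fun k => ys.filter (fun m => key m = k)) :=
      List.flatMap_congr (fun k hk => by rw [if_neg (hne₂ k hk), List.append_nil])
    rw [e₁, e₂]
    simp [List.append_assoc]

-- the buckets' contents: each bucket holds its key's matches in original order
theorem pv_getD_buckets (matched : List (List (String × String))) (k : String) :
    ((matched.map (fun m => (pvDateKey m, m))).foldl
        (fun d p => d.modify p.1 [] (fun v => v ++ [p.2])) PySem.Dict.empty).getD k []
      = matched.filter (fun m => pvDateKey m = k) := by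
  rw [PySem.Dict.getD_foldl_modify_append]
  simp only [PySem.Dict.getD_empty, List.nil_append, List.filter_map, Function.comp_def,
    List.map_map]
  simp
  exact List.filter_congr (fun x _ => Bool.beq_eq_decide_eq _ _)

-- the buckets' keys: the distinct date keys of the matches, in first-occurrence order
theorem pv_keys_buckets (matched : List (List (String × String))) :
    ((matched.map (fun m => (pvDateKey m, m))).foldl
        (fun d p => d.modify p.1 [] (fun v => v ++ [p.2])) PySem.Dict.empty).keys
      = PySem.Set.ofList (matched.map pvDateKey) := by
  rw [PySem.Dict.keys_foldl_modify_key]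
  simp only [PySem.Dict.keys_empty, List.map_map]
  rfl

-- ===== VERDICT (by name: the statement is the Claim_ definition above) =====
theorem select_messages_with_keywords_spec : Claim_equal_select_messages_with_keywords := by
  intro messages keywords limit _
  unfold Spec_select_messages_with_keywords
  unfold select_messages_with_keywords select_messages_with_keywords_alt
  simp only [pv_matched_eq_filter, pv_buckets_eq_pairs_fold]
  set kws := keywords.map (fun kw => PySem.Str.lower kw) with hkws
  set matched := messages.filter (pvIsMatch kws) with hmatched
  set buckets := (matched.map (fun m => (pvDateKey m, m))).foldl
      (fun d p => d.modify p.1 [] (fun v => v ++ [p.2])) PySem.Dict.empty with hbuckets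
  set ks := PySem.List.sorted (PySem.Set.ofList (matched.map pvDateKey)) (fun k => k) with hks
  congr 1
  rw [pv_sorted_eq_flatMap pvDateKey matched ks
    (PySem.List.sorted_ofList_pairwise_lt (matched.map pvDateKey))
    (fun m hm => (PySem.List.mem_sorted _ _ _ _).mpr
      ((PySem.Set.mem_ofList _ _).mpr (List.mem_map_of_mem hm)))]
  rw [hbuckets, pv_keys_buckets matched, ← hks, ← hbuckets]
  rw [PySem.List.foldl_append_eq_flatMap (fun k => buckets.getD k []) ks [], List.nil_append]
  exact List.flatMap_congr (fun k _ => (pv_getD_buckets matched k).symm)
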